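-- pv_equiv track=rewrite | github.com/nguyenthutra3004/LLMOPS_APPROACH_PROJECT | monitoring_cluster/crawler/utils/utils.py | check_table_content
-- ===== SOURCE A (Python) =====
-- def check_table_content(text):
--     new_text = ""
--
--     table_lines = []
--     texts = text.split("\n")
--     is_table = False
--
--     for i,t in enumerate(texts):
--         num_colons = t.count("|") + 1
--         if num_colons > 1 and not is_table:
--             # Look ahead to see if the next line is a table line
--             if i < len(texts) - 1:
--                 next_line = texts[i+1]
--                 if next_line.count("|") + 1 == num_colons:
--
--                     flag_table_divider = True
--                     unique_chars = set(next_line)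
--                     for char in unique_chars:
--                         if char not in [" ", "-", ":", "|"]:
--                             flag_table_divider = False
--
--                     if flag_table_divider:
--                         is_table = True
--                         table_lines.append(t)
--                         continue
--
--         if num_colons > 1 and is_table:
--             table_lines.append(t)
--             continue
--
--
--         # If we have a table, process it
--         # If not, just add the text
--         if len(table_lines) > 0:
--             for line in table_lines:
--                 new_text += "| " + line + "|\n"
--             new_text += "\n"
--         table_lines = []
--         is_table = False
--         new_text += t + "\n"
--
--     if len(table_lines) > 0:
--         for line in table_lines:
--             new_text += "| " + line + "|\n"
--         new_text += "\n"
--     return new_text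
-- ===== SOURCE B (Python) =====
-- def check_table_content(text):
--     texts = text.split("\n")
--     n = len(texts)
--     out = []
--     i = 0
--     while i < n:
--         t = texts[i]
--         if "|" in t and i + 1 < n \
--            and texts[i + 1].count("|") == t.count("|") \
--            and all(c in " -:|" for c in texts[i + 1]):
--             # table block: consume the run of lines containing '|'
--             j = i
--             while j < n and "|" in texts[j]:
--                 out.append("| " + texts[j] + "|\n")
--                 j += 1
--             out.append("\n")
--             i = j
--         else:
--             out.append(t + "\n")
--             i += 1
--     return "".join(out)
-- ===== Notes on version B (the rewrite author's own statement) =====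
-- stated objective: simpler
-- what changed: Replaces A's enumerate-fold with is_table/table_lines state and deferred flushing by an index-based while loop that recognises a table block at its header and consumes the whole run of '|' lines in one inner loop, emitting output pieces into a list joined at the end.
import Mathlib
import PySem

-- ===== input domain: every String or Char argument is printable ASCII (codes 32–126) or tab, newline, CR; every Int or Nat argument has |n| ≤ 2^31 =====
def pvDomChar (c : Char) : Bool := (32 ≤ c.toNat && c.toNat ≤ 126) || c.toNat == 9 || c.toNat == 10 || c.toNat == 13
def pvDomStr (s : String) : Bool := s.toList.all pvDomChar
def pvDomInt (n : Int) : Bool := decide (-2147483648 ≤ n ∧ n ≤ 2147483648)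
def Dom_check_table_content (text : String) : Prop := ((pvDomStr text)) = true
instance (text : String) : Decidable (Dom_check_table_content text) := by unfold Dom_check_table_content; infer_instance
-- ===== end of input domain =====

-- B replaces A's enumerate-fold with is_table/table_lines state and deferred flushes by an
-- index-based while loop that consumes each table block as a run (objective: simpler decomposition).
-- Both loops are ported with a structural fuel counter (texts.length suffices) as totality device.

-- ===== PORT A =====
-- the unique_chars loop of A: flag starts True, cleared by any char outside " -:|"
def pvFlagTableDivider (next_line : List Char) : Bool :=
  (PySem.Set.ofList next_line).foldl
    (fun flag ch => if ch ∈ [' ', '-', ':', '|'] then flag else false) true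

-- the flush of table_lines A performs when a table ends (and at end of text)
def pvAFlush (table_lines : List (List Char)) : List Char :=
  if 0 < table_lines.length then
    table_lines.foldl (fun acc line => acc ++ ('|' :: ' ' :: line) ++ ['|', '\n']) [] ++ ['\n']
  else []

-- the 'for i, t in enumerate(texts)' loop of A, as recursion on the index (fuel-bounded)
def pvALoop (texts : List (List Char)) : Nat → Nat → List Char → List (List Char) → Bool → List Char
  | 0, _, new_text, table_lines, _ => new_text ++ pvAFlush table_lines
  | fuel + 1, i, new_text, table_lines, is_table =>
    if i < texts.length then
      if 1 < PySem.Chars.count (texts.getD i []) ['|'] + 1 ∧ is_table = false ∧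
          i < texts.length - 1 ∧
          PySem.Chars.count (texts.getD (i + 1) []) ['|'] + 1 =
            PySem.Chars.count (texts.getD i []) ['|'] + 1 ∧
          pvFlagTableDivider (texts.getD (i + 1) []) = true then
        pvALoop texts fuel (i + 1) new_text (table_lines ++ [texts.getD i []]) true
      else if 1 < PySem.Chars.count (texts.getD i []) ['|'] + 1 ∧ is_table = true then
        pvALoop texts fuel (i + 1) new_text (table_lines ++ [texts.getD i []]) is_table
      else
        pvALoop texts fuel (i + 1)
          (new_text ++ pvAFlush table_lines ++ texts.getD i [] ++ ['\n']) [] false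
    else new_text ++ pvAFlush table_lines

def check_table_content (text : String) : String :=
  String.ofList (pvALoop (PySem.Chars.splitOn text.toList ['\n'])
    (PySem.Chars.splitOn text.toList ['\n']).length 0 [] [] false)

-- ===== PORT B =====
-- Source B's inner 'while j < n and "|" in texts[j]' loop: wrap and emit the run of '|' lines
def pvBInner (texts : List (List Char)) : Nat → Nat → List (List Char) → List (List Char) × Nat
  | 0, j, out => (out, j)
  | fuel + 1, j, out =>
    if j < texts.length ∧ PySem.Chars.isIn ['|'] (texts.getD j []) = true then
      pvBInner texts fuel (j + 1) (out ++ [('|' :: ' ' :: texts.getD j []) ++ ['|', '\n']])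
    else (out, j)

-- Source B's outer 'while i < n' loop
def pvBLoop (texts : List (List Char)) : Nat → Nat → List (List Char) → List (List Char)
  | 0, _, out => out
  | fuel + 1, i, out =>
    if i < texts.length then
      if PySem.Chars.isIn ['|'] (texts.getD i []) = true ∧ i + 1 < texts.length ∧
          PySem.Chars.count (texts.getD (i + 1) []) ['|'] =
            PySem.Chars.count (texts.getD i []) ['|'] ∧
          (texts.getD (i + 1) []).all (fun c => [' ', '-', ':', '|'].contains c) = true then
        pvBLoop texts fuel (pvBInner texts (fuel + 1) i out).2
          ((pvBInner texts (fuel + 1) i out).1 ++ [['\n']])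
      else pvBLoop texts fuel (i + 1) (out ++ [texts.getD i [] ++ ['\n']])
    else out

def check_table_content_alt (text : String) : String :=
  String.ofList (PySem.Chars.join [] (pvBLoop (PySem.Chars.splitOn text.toList ['\n'])
    (PySem.Chars.splitOn text.toList ['\n']).length 0 []))

-- ===== PRECONDITION & SPEC =====
def Spec_check_table_content (text : String) (out : String) : Prop := out = check_table_content_alt text
instance (text : String) (out : String) : Decidable (Spec_check_table_content text out) := by unfold Spec_check_table_content; infer_instance

-- ===== CLAIM (what is proved, stated in full; the proofs are below) =====
def Claim_equal_check_table_content : Prop := ∀ (text : String), Dom_check_table_content text → Spec_check_table_content text (check_table_content text)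

-- ===== LEMMAS AND PROOFS =====

-- the wrapped form "| " + line + "|\n" both programs emit for a table line
def pvWrapP (line : List Char) : List Char := ('|' :: ' ' :: line) ++ ['|', '\n']

-- one-step equations (definitional)
lemma pvALoop_step (texts : List (List Char)) (fuel i : Nat) (acc : List Char)
    (tls : List (List Char)) (b : Bool) :
    pvALoop texts (fuel + 1) i acc tls b =
      (if i < texts.length then
        if 1 < PySem.Chars.count (texts.getD i []) ['|'] + 1 ∧ b = false ∧
            i < texts.length - 1 ∧
            PySem.Chars.count (texts.getD (i + 1) []) ['|'] + 1 =
              PySem.Chars.count (texts.getD i []) ['|'] + 1 ∧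
            pvFlagTableDivider (texts.getD (i + 1) []) = true then
          pvALoop texts fuel (i + 1) acc (tls ++ [texts.getD i []]) true
        else if 1 < PySem.Chars.count (texts.getD i []) ['|'] + 1 ∧ b = true then
          pvALoop texts fuel (i + 1) acc (tls ++ [texts.getD i []]) b
        else
          pvALoop texts fuel (i + 1) (acc ++ pvAFlush tls ++ texts.getD i [] ++ ['\n']) [] false
      else acc ++ pvAFlush tls) := rfl

lemma pvBInner_step (texts : List (List Char)) (fuel j : Nat) (out : List (List Char)) :
    pvBInner texts (fuel + 1) j out =
      (if j < texts.length ∧ PySem.Chars.isIn ['|'] (texts.getD j []) = true then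
        pvBInner texts fuel (j + 1) (out ++ [('|' :: ' ' :: texts.getD j []) ++ ['|', '\n']])
      else (out, j)) := rfl

lemma pvBLoop_step (texts : List (List Char)) (fuel i : Nat) (out : List (List Char)) :
    pvBLoop texts (fuel + 1) i out =
      (if i < texts.length then
        if PySem.Chars.isIn ['|'] (texts.getD i []) = true ∧ i + 1 < texts.length ∧
            PySem.Chars.count (texts.getD (i + 1) []) ['|'] =
              PySem.Chars.count (texts.getD i []) ['|'] ∧
            (texts.getD (i + 1) []).all (fun c => [' ', '-', ':', '|'].contains c) = true then
          pvBLoop texts fuel (pvBInner texts (fuel + 1) i out).2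
            ((pvBInner texts (fuel + 1) i out).1 ++ [['\n']])
        else pvBLoop texts fuel (i + 1) (out ++ [texts.getD i [] ++ ['\n']])
      else out) := rfl

-- terminal forms (index past the end): any fuel gives the loop's exit value
lemma pvALoop_terminal (texts : List (List Char)) (fuel i : Nat) (acc : List Char)
    (tls : List (List Char)) (b : Bool) (h : ¬ i < texts.length) :
    pvALoop texts fuel i acc tls b = acc ++ pvAFlush tls := by
  cases fuel with
  | zero => rfl
  | succ fuel => rw [pvALoop_step, if_neg h]

lemma pvBInner_terminal (texts : List (List Char)) (fuel j : Nat) (out : List (List Char))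
    (h : ¬ j < texts.length) :
    pvBInner texts fuel j out = (out, j) := by
  cases fuel with
  | zero => rfl
  | succ fuel =>
      rw [pvBInner_step, if_neg]
      rintro ⟨hc, -⟩
      exact h hc

lemma pvBLoop_terminal (texts : List (List Char)) (fuel i : Nat) (out : List (List Char))
    (h : ¬ i < texts.length) :
    pvBLoop texts fuel i out = out := by
  cases fuel with
  | zero => rfl
  | succ fuel => rw [pvBLoop_step, if_neg h]

lemma pvCountGo_singleton (c : Char) :
    ∀ (fuel : Nat) (l : List Char) (acc : Nat), l.length ≤ fuel →
      PySem.Chars.count.go [c] fuel l acc = acc + l.count c := by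
  intro fuel
  induction fuel with
  | zero =>
      intro l acc h
      have : l = [] := by
        cases l with
        | nil => rfl
        | cons x t => simp at h
      subst this
      simp [PySem.Chars.count.go]
  | succ fuel ih =>
      intro l acc h
      cases l with
      | nil => simp [PySem.Chars.count.go]
      | cons x t =>
          simp only [PySem.Chars.count.go]
          have ht : t.length ≤ fuel := by simp at h; omega
          by_cases hx : c = x
          · subst hx
            have hpre : [c].isPrefixOf (c :: t) = true := by
              simp [List.isPrefixOf]
            rw [hpre]
            simp only [if_true]
            have hdrop : List.drop [c].length (c :: t) = t := by simp
            rw [hdrop, ih t (acc + 1) ht]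
            simp [List.count_cons]
            omega
          · have hpre : [c].isPrefixOf (x :: t) = false := by
              simp [List.isPrefixOf]
              intro hcx
              exact absurd hcx hx
            rw [hpre]
            simp only [Bool.false_eq_true, if_false]
            rw [ih t acc ht]
            have : List.count c (x :: t) = List.count c t := by
              simp [List.count_cons]
              intro hxc
              exact absurd hxc.symm hx
            omega

lemma pvCount_singleton (s : List Char) (c : Char) :
    PySem.Chars.count s [c] = s.count c := by
  unfold PySem.Chars.count
  simp only [List.isEmpty_cons, if_false, Bool.false_eq_true]
  have := pvCountGo_singleton c s.length s 0 (Nat.le_refl _)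
  omega

lemma pvIsIn_singleton (s : List Char) (c : Char) :
    PySem.Chars.isIn [c] s = true ↔ c ∈ s := by
  rw [PySem.Chars.isIn_iff_infix]
  constructor
  · intro h
    exact (List.singleton_sublist.mp h.sublist)
  · intro h
    obtain ⟨l1, l2, rfl⟩ := List.append_of_mem h
    exact ⟨l1, l2, by simp⟩

lemma pvFlagFold (l : List Char) (b : Bool) :
    l.foldl (fun flag ch => if ch ∈ [' ', '-', ':', '|'] then flag else false) b =
      (b && l.all (fun c => [' ', '-', ':', '|'].contains c)) := by
  induction l generalizing b with
  | nil => simp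
  | cons x t ih =>
      simp only [List.foldl_cons, List.all_cons, ih]
      by_cases hx : x ∈ [' ', '-', ':', '|']
      · simp [hx]
      · simp [hx]

lemma pvFlag_eq_all (nxt : List Char) :
    pvFlagTableDivider nxt = nxt.all (fun c => [' ', '-', ':', '|'].contains c) := by
  unfold pvFlagTableDivider
  rw [pvFlagFold]
  simp only [Bool.true_and]
  rcases h : nxt.all (fun c => [' ', '-', ':', '|'].contains c) with _ | _
  · rw [List.all_eq_false] at h ⊢
    obtain ⟨x, hx, hxf⟩ := h
    exact ⟨x, (PySem.Set.mem_ofList nxt x).mpr hx, hxf⟩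
  · rw [List.all_eq_true] at h ⊢
    intro x hx
    exact h x ((PySem.Set.mem_ofList nxt x).mp hx)

lemma pvAFlush_eq (tls : List (List Char)) (h : tls ≠ []) :
    pvAFlush tls = tls.flatMap pvWrapP ++ ['\n'] := by
  unfold pvAFlush
  rw [if_pos (by simpa [List.length_pos_iff] using h)]
  have : (fun (acc : List Char) line => acc ++ ('|' :: ' ' :: line) ++ ['|', '\n']) =
      (fun acc line => acc ++ pvWrapP line) := by
    funext acc line
    simp [pvWrapP]
  rw [this, PySem.List.foldl_append_eq_flatMap]
  simp

lemma pvJoin_nil (l : List (List Char)) : PySem.Chars.join [] l = l.flatten := by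
  simp [PySem.Chars.join, List.intercalate]
  induction l with
  | nil => simp
  | cons x t ih =>
      cases t with
      | nil => simp [List.intersperse]
      | cons y u =>
          simp [List.intersperse] at ih ⊢
          exact ih

-- accumulator extraction
lemma pvALoop_acc (texts : List (List Char)) :
    ∀ (fuel i : Nat) (a acc : List Char) (tls : List (List Char)) (b : Bool),
      pvALoop texts fuel i (a ++ acc) tls b = a ++ pvALoop texts fuel i acc tls b := by
  intro fuel
  induction fuel with
  | zero =>
      intro i a acc tls b
      simp [pvALoop]
  | succ fuel ih =>
      intro i a acc tls b
      rw [pvALoop_step, pvALoop_step]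
      by_cases hlt : i < texts.length
      · rw [if_pos hlt, if_pos hlt]
        split
        · exact ih (i + 1) a acc _ _
        · split
          · exact ih (i + 1) a acc _ _
          · have : a ++ acc ++ pvAFlush tls ++ texts.getD i [] ++ ['\n'] =
                a ++ (acc ++ pvAFlush tls ++ texts.getD i [] ++ ['\n']) := by simp
            rw [this]
            exact ih (i + 1) a _ _ _
      · rw [if_neg hlt, if_neg hlt]
        simp

lemma pvALoop_out (texts : List (List Char)) (fuel i : Nat) (acc : List Char)
    (tls : List (List Char)) (b : Bool) :
    pvALoop texts fuel i acc tls b = acc ++ pvALoop texts fuel i [] tls b := by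
  conv_lhs => rw [← List.append_nil acc]
  exact pvALoop_acc texts fuel i acc [] tls b

lemma pvBInner_acc (texts : List (List Char)) :
    ∀ (fuel j : Nat) (a out : List (List Char)),
      pvBInner texts fuel j (a ++ out) =
        (a ++ (pvBInner texts fuel j out).1, (pvBInner texts fuel j out).2) := by
  intro fuel
  induction fuel with
  | zero =>
      intro j a out
      simp [pvBInner]
  | succ fuel ih =>
      intro j a out
      rw [pvBInner_step, pvBInner_step]
      split
      · rw [List.append_assoc]
        exact ih (j + 1) a _
      · rfl

lemma pvBInner_out (texts : List (List Char)) (fuel j : Nat) (L : List (List Char)) :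
    pvBInner texts fuel j L = (L ++ (pvBInner texts fuel j []).1, (pvBInner texts fuel j []).2) := by
  conv_lhs => rw [← List.append_nil L]
  exact pvBInner_acc texts fuel j L []

lemma pvBLoop_acc (texts : List (List Char)) :
    ∀ (fuel i : Nat) (a out : List (List Char)),
      pvBLoop texts fuel i (a ++ out) = a ++ pvBLoop texts fuel i out := by
  intro fuel
  induction fuel with
  | zero =>
      intro i a out
      simp [pvBLoop]
  | succ fuel ih =>
      intro i a out
      rw [pvBLoop_step, pvBLoop_step]
      by_cases hlt : i < texts.length
      · rw [if_pos hlt, if_pos hlt]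
        split
        · rw [pvBInner_out texts (fuel + 1) i (a ++ out), pvBInner_out texts (fuel + 1) i out]
          simp only [List.append_assoc]
          exact ih _ a _
        · rw [List.append_assoc]
          exact ih (i + 1) a _
      · rw [if_neg hlt, if_neg hlt]
  
lemma pvBLoop_out (texts : List (List Char)) (fuel i : Nat) (L : List (List Char)) :
    pvBLoop texts fuel i L = L ++ pvBLoop texts fuel i [] := by
  conv_lhs => rw [← List.append_nil L]
  exact pvBLoop_acc texts fuel i L []

lemma pvBInner_snd_ge (texts : List (List Char)) :
    ∀ (fuel j : Nat) (out : List (List Char)), j ≤ (pvBInner texts fuel j out).2 := by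
  intro fuel
  induction fuel with
  | zero => intro j out; simp [pvBInner]
  | succ fuel ih =>
      intro j out
      rw [pvBInner_step]
      split
      · have := ih (j + 1) (out ++ [('|' :: ' ' :: texts.getD j []) ++ ['|', '\n']])
        omega
      · simp

-- the inner loop's result does not depend on the fuel, given enough of it
lemma pvBInner_fuel (texts : List (List Char)) :
    ∀ (f1 f2 j : Nat) (out : List (List Char)),
      texts.length - j ≤ f1 → texts.length - j ≤ f2 →
      pvBInner texts f1 j out = pvBInner texts f2 j out := by
  intro f1
  induction f1 with
  | zero =>
      intro f2 j out h1 h2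
      have hj : ¬ j < texts.length := by omega
      rw [pvBInner_terminal texts 0 j out hj, pvBInner_terminal texts f2 j out hj]
  | succ f1 ih =>
      intro f2 j out h1 h2
      by_cases hj : j < texts.length
      · cases f2 with
        | zero => omega
        | succ f2 =>
            rw [pvBInner_step, pvBInner_step]
            split
            · exact ih f2 (j + 1) _ (by omega) (by omega)
            · rfl
      · rw [pvBInner_terminal texts _ j out hj, pvBInner_terminal texts f2 j out hj]

lemma pvBLoop_fuel (texts : List (List Char)) :
    ∀ (f1 f2 i : Nat) (out : List (List Char)),
      texts.length - i ≤ f1 → texts.length - i ≤ f2 →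
      pvBLoop texts f1 i out = pvBLoop texts f2 i out := by
  intro f1
  induction f1 with
  | zero =>
      intro f2 i out h1 h2
      have hi : ¬ i < texts.length := by omega
      rw [pvBLoop_terminal texts 0 i out hi, pvBLoop_terminal texts f2 i out hi]
  | succ f1 ih =>
      intro f2 i out h1 h2
      by_cases hi : i < texts.length
      · cases f2 with
        | zero => omega
        | succ f2 =>
            rw [pvBLoop_step, pvBLoop_step, if_pos hi, if_pos hi]
            split
            · next hc =>
                have hin : pvBInner texts (f1 + 1) i out = pvBInner texts (f2 + 1) i out :=
                  pvBInner_fuel texts (f1 + 1) (f2 + 1) i out (by omega) (by omega)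
                rw [← hin]
                have hge : i + 1 ≤ (pvBInner texts (f1 + 1) i out).2 := by
                  rw [pvBInner_step, if_pos ⟨hi, hc.1⟩]
                  have := pvBInner_snd_ge texts f1 (i + 1)
                    (out ++ [('|' :: ' ' :: texts.getD i []) ++ ['|', '\n']])
                  omega
                exact ih f2 _ _ (by omega) (by omega)
            · exact ih f2 (i + 1) _ (by omega) (by omega)
      · rw [pvBLoop_terminal texts _ i out hi, pvBLoop_terminal texts f2 i out hi]

-- the main correspondence: outside a table A's loop produces B's outer loop output;
-- inside a table A's accumulation produces B's inner run followed by the rest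
lemma pvMain (texts : List (List Char)) :
    ∀ (fuel i : Nat), texts.length - i ≤ fuel →
      (pvALoop texts fuel i [] [] false = (pvBLoop texts fuel i []).flatten) ∧
      (∀ tls : List (List Char), tls ≠ [] →
        pvALoop texts fuel i [] tls true =
          tls.flatMap pvWrapP ++ (pvBInner texts fuel i []).1.flatten ++ ['\n'] ++
            (pvBLoop texts fuel (pvBInner texts fuel i []).2 []).flatten) := by
  intro fuel
  induction fuel with
  | zero =>
      intro i hm
      have hn : ¬ i < texts.length := by omega
      constructor
      · rw [pvALoop_terminal texts 0 i [] [] false hn, pvBLoop_terminal texts 0 i [] hn]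
        simp [pvAFlush]
      · intro tls htls
        rw [pvALoop_terminal texts 0 i [] tls true hn]
        simp [pvAFlush_eq tls htls, pvBInner, pvBLoop]
  | succ m ih =>
      intro i hm
      by_cases hlt : i < texts.length
      · have e1 : (1 < PySem.Chars.count (texts.getD i []) ['|'] + 1) ↔
            PySem.Chars.isIn ['|'] (texts.getD i []) = true := by
          rw [pvCount_singleton, pvIsIn_singleton]
          constructor
          · intro h
            exact List.count_pos_iff.mp (by omega)
          · intro h
            have := List.count_pos_iff.mpr h
            omega
        constructor
        · -- part 1: not inside a table
          rw [pvALoop_step, if_pos hlt]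
          by_cases hB : (PySem.Chars.isIn ['|'] (texts.getD i []) = true ∧ i + 1 < texts.length ∧
              PySem.Chars.count (texts.getD (i + 1) []) ['|'] =
                PySem.Chars.count (texts.getD i []) ['|'] ∧
              (texts.getD (i + 1) []).all (fun c => [' ', '-', ':', '|'].contains c) = true)
          · have hAcond : 1 < PySem.Chars.count (texts.getD i []) ['|'] + 1 ∧ (false : Bool) = false ∧
                i < texts.length - 1 ∧
                PySem.Chars.count (texts.getD (i + 1) []) ['|'] + 1 =
                  PySem.Chars.count (texts.getD i []) ['|'] + 1 ∧
                pvFlagTableDivider (texts.getD (i + 1) []) = true := by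
              obtain ⟨b1, b2, b3, b4⟩ := hB
              refine ⟨e1.mpr b1, rfl, by omega, by omega, ?_⟩
              rw [pvFlag_eq_all]
              exact b4
            rw [if_pos hAcond]
            have h2 := (ih (i + 1) (by omega)).2 [texts.getD i []] (by simp)
            have hI : pvBInner texts (m + 1) i [] =
                ((('|' :: ' ' :: texts.getD i []) ++ ['|', '\n']) :: (pvBInner texts m (i + 1) []).1,
                  (pvBInner texts m (i + 1) []).2) := by
              rw [pvBInner_step, if_pos ⟨hlt, hB.1⟩]
              rw [pvBInner_out]
              simp
            conv_rhs => rw [pvBLoop_step]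
            rw [if_pos hlt, if_pos hB, hI]
            simp only [List.nil_append] at h2 ⊢
            rw [h2]
            conv_rhs => rw [pvBLoop_out]
            simp [pvWrapP, List.append_assoc]
          · have hAcond : ¬ (1 < PySem.Chars.count (texts.getD i []) ['|'] + 1 ∧ (false : Bool) = false ∧
                i < texts.length - 1 ∧
                PySem.Chars.count (texts.getD (i + 1) []) ['|'] + 1 =
                  PySem.Chars.count (texts.getD i []) ['|'] + 1 ∧
                pvFlagTableDivider (texts.getD (i + 1) []) = true) := by
              rintro ⟨a1, -, a3, a4, a5⟩
              refine hB ⟨e1.mp a1, by omega, by omega, ?_⟩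
              rw [← pvFlag_eq_all]
              exact a5
            rw [if_neg hAcond, if_neg (by simp)]
            rw [pvALoop_out, (ih (i + 1) (by omega)).1]
            conv_rhs => rw [pvBLoop_step]
            rw [if_pos hlt, if_neg hB]
            conv_rhs => rw [pvBLoop_out]
            simp [pvAFlush]
        · -- part 2: inside a table
          intro tls htls
          rw [pvALoop_step, if_pos hlt, if_neg (by simp)]
          by_cases hmem : PySem.Chars.isIn ['|'] (texts.getD i []) = true
          · rw [if_pos ⟨e1.mpr hmem, rfl⟩]
            have h2 := (ih (i + 1) (by omega)).2 (tls ++ [texts.getD i []]) (by simp)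
            have hI : pvBInner texts (m + 1) i [] =
                ((('|' :: ' ' :: texts.getD i []) ++ ['|', '\n']) :: (pvBInner texts m (i + 1) []).1,
                  (pvBInner texts m (i + 1) []).2) := by
              rw [pvBInner_step, if_pos ⟨hlt, hmem⟩]
              rw [pvBInner_out]
              simp
            rw [hI]
            simp only [List.nil_append] at h2 ⊢
            rw [h2]
            have hge : i + 1 ≤ (pvBInner texts m (i + 1) []).2 := pvBInner_snd_ge texts m (i + 1) []
            rw [pvBLoop_fuel texts (m + 1) m (pvBInner texts m (i + 1) []).2 [] (by omega) (by omega)]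
            simp [pvWrapP, List.append_assoc]
          · rw [if_neg (by rintro ⟨a1, -⟩; exact hmem (e1.mp a1))]
            rw [pvALoop_out, (ih (i + 1) (by omega)).1, pvAFlush_eq tls htls]
            have hI : pvBInner texts (m + 1) i [] = ([], i) := by
              rw [pvBInner_step, if_neg (by rintro ⟨-, hc⟩; exact hmem hc)]
            rw [hI]
            have hBstep : pvBLoop texts (m + 1) i [] =
                (texts.getD i [] ++ ['\n']) :: pvBLoop texts m (i + 1) [] := by
              rw [pvBLoop_step, if_pos hlt, if_neg (by rintro ⟨hc, -⟩; exact hmem hc)]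
              rw [pvBLoop_out]
              simp
            simp [hBstep]
      · have h0 := ih i (by omega)
        have hn : ¬ i < texts.length := hlt
        constructor
        · rw [pvALoop_terminal texts _ i [] [] false hn, pvBLoop_terminal texts _ i [] hn]
          simp [pvAFlush]
        · intro tls htls
          rw [pvALoop_terminal texts _ i [] tls true hn,
            pvBInner_terminal texts _ i [] hn, pvBLoop_terminal texts _ i [] hn]
          simp [pvAFlush_eq tls htls]

theorem pv_top (text : String) :
    check_table_content text = check_table_content_alt text := by
  unfold check_table_content check_table_content_alt
  rw [pvJoin_nil]
  congr 1
  exact (pvMain (PySem.Chars.splitOn text.toList ['\n'])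
    (PySem.Chars.splitOn text.toList ['\n']).length 0 (Nat.le_refl _)).1

-- ===== VERDICT (by name: the statement is the Claim_ definition above) =====
theorem check_table_content_spec : Claim_equal_check_table_content := by
  intro text _
  unfold Spec_check_table_content
  exact pv_top text
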